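-- pv_equiv track=rewrite | github.com/Dmitry1409/search_phon_fullversion | search.py | search_duble_in_dict
-- ===== SOURCE A (Python) =====
-- def search_duble_in_dict(search_dt, main_dict):
-- 	recdt = {}
-- 	db = 0
-- 	for sd in search_dt:
-- 		fl = False
-- 		for md in main_dict:
-- 			if sd == md:
-- 				fl = True
-- 				db += 1
-- 				break
-- 		if not fl:
-- 			recdt[sd] = search_dt[sd]
-- 	return recdt, db
-- ===== SOURCE B (Python) =====
-- def search_duble_in_dict(search_dt, main_dict):
--     # Start from a copy of search_dt and delete every key seen in main_dict;
--     # the number of matches falls out arithmetically as the shrinkage.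
--     recdt = dict(search_dt)
--     for md in main_dict:
--         recdt.pop(md, None)
--     return recdt, len(search_dt) - len(recdt)
-- ===== Notes on version B (the rewrite author's own statement) =====
-- stated objective: faster
-- what changed: Instead of scanning main_dict for each search key with a flag and an in-loop counter, B copies search_dt once, iterates over main_dict deleting each of its keys from the copy, and obtains the match count arithmetically as len(search_dt) - len(recdt).
import Mathlib
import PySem

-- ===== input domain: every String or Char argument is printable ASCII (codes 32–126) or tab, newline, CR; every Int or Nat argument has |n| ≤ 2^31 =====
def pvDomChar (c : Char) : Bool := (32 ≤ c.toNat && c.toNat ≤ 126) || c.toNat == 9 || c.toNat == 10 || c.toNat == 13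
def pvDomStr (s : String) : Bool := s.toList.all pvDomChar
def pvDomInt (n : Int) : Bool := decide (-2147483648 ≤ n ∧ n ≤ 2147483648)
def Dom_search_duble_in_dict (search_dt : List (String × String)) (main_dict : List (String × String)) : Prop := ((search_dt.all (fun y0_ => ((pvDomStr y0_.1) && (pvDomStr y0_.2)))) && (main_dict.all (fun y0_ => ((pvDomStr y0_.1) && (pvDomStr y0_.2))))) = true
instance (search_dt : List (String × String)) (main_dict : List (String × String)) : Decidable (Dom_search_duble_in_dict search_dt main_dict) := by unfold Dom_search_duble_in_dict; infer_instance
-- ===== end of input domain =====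

-- B replaces A's per-key scan of main_dict (flag + in-loop counter) by the inverse
-- traversal: copy search_dt once, iterate over main_dict deleting its keys from the
-- copy, and obtain the count arithmetically as len(search_dt) - len(recdt): alternative.
-- (B mutates only its private copy; neither program mutates its arguments.)

-- ===== PORT A =====
-- inner 'for md in main_dict: if sd == md: fl = True; db += 1; break'
def pvInnerA (sd : String) (db : Int) : List String → Bool × Int
  | [] => (false, db)
  | md :: rest => if sd == md then (true, db + 1) else pvInnerA sd db rest

-- one iteration of the outer loop body ('search_dt[sd]' always hits since sd is a key, so getD's default is never used)
def pvStepA (sdict : PySem.Dict String String) (mkeys : List String)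
    (st : PySem.Dict String String × Int) (sd : String) : PySem.Dict String String × Int :=
  let r := pvInnerA sd st.2 mkeys
  if !r.1 then (st.1.insert sd (sdict.getD sd ""), r.2) else (st.1, r.2)

def search_duble_in_dict (search_dt : List (String × String)) (main_dict : List (String × String)) : (List (String × String)) × Int :=
  let sdict := PySem.Dict.ofList search_dt
  let mdict := PySem.Dict.ofList main_dict
  let res := sdict.keys.foldl (pvStepA sdict mdict.keys) (PySem.Dict.empty, 0)
  (res.1.items, res.2)

-- ===== PORT B =====
def search_duble_in_dict_alt (search_dt : List (String × String)) (main_dict : List (String × String)) : (List (String × String)) × Int :=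
  let recdt0 := PySem.Dict.ofList search_dt          -- recdt = dict(search_dt)
  let mdict := PySem.Dict.ofList main_dict
  -- 'for md in main_dict: recdt.pop(md, None)' — pop with a default discards the value, i.e. Dict.erase (exact)
  let recdt := mdict.keys.foldl (fun d md => d.erase md) recdt0
  (recdt.items, (recdt0.size : Int) - (recdt.size : Int))  -- len(search_dt) - len(recdt)

-- ===== PRECONDITION & SPEC =====
def Spec_search_duble_in_dict (search_dt : List (String × String)) (main_dict : List (String × String)) (out : (List (String × String)) × Int) : Prop := out = search_duble_in_dict_alt search_dt main_dict
instance (search_dt : List (String × String)) (main_dict : List (String × String)) (out : (List (String × String)) × Int) : Decidable (Spec_search_duble_in_dict search_dt main_dict out) := by unfold Spec_search_duble_in_dict; infer_instance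

-- ===== CLAIM =====
def Claim_equal_search_duble_in_dict : Prop := ∀ (search_dt : List (String × String)) (main_dict : List (String × String)), Dom_search_duble_in_dict search_dt main_dict → Spec_search_duble_in_dict search_dt main_dict (search_duble_in_dict search_dt main_dict)

-- ===== LEMMAS AND PROOFS =====

lemma pvInnerA_eq (sd : String) (db : Int) (m : List String) :
    pvInnerA sd db m = (m.contains sd, if m.contains sd then db + 1 else db) := by
  induction m with
  | nil => simp [pvInnerA]
  | cons md rest ih =>
    by_cases h : sd = md
    · simp [pvInnerA, h]
    · have h' : (md == sd) = false := by simpa [beq_iff_eq] using (Ne.symm h)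
      simp [pvInnerA, h, ih]

lemma pvFoldA_spec (sdict : PySem.Dict String String) (m : List String) :
    ∀ (ks : List String) (d : PySem.Dict String String) (db : Int),
      ks.Nodup → (∀ k ∈ ks, d.contains k = false) →
      ks.foldl (pvStepA sdict m) (d, db) =
        (PySem.Dict.mk (d.items ++ (ks.filter (fun k => !(m.contains k))).map (fun k => (k, sdict.getD k ""))),
         db + ((ks.filter (fun k => m.contains k)).length : Int)) := by
  intro ks
  induction ks with
  | nil => intro d db _ _; simp
  | cons k rest ih =>
    intro d db hnd hdis
    have hkd : d.contains k = false := hdis k (by simp)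
    have hnd' : rest.Nodup := hnd.of_cons
    have hkni : k ∉ rest := (List.nodup_cons.mp hnd).1
    by_cases hm : m.contains k = true
    · have hkm : k ∈ m := by simpa using hm
      have hstep : pvStepA sdict m (d, db) k = (d, db + 1) := by
        simp [pvStepA, pvInnerA_eq, hkm]
      rw [List.foldl_cons, hstep, ih d (db + 1) hnd' (fun k' hk' => hdis k' (by simp [hk']))]
      refine Prod.ext_iff.mpr ⟨?_, ?_⟩
      · simp [hkm]
      · simp [hkm]
        ring
    · have hm' : m.contains k = false := by simpa using hm
      have hkm : k ∉ m := by simpa using hm'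
      have hstep : pvStepA sdict m (d, db) k = (d.insert k (sdict.getD k ""), db) := by
        simp [pvStepA, pvInnerA_eq, hkm]
      have hdis' : ∀ k' ∈ rest, (d.insert k (sdict.getD k "")).contains k' = false := by
        intro k' hk'
        have hne : (k' == k) = false := by
          simp only [beq_eq_false_iff_ne]
          intro h; subst h; exact hkni hk'
        rw [PySem.Dict.contains_insert]
        simp [hne, hdis k' (by simp [hk'])]
      rw [List.foldl_cons, hstep, ih _ db hnd' hdis']
      have hitems : (d.insert k (sdict.getD k "")).items = d.items ++ [(k, sdict.getD k "")] :=
        PySem.Dict.items_insert_of_not_contains _ _ hkd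
      refine Prod.ext_iff.mpr ⟨?_, ?_⟩
      · simp [hkm, hitems]
      · simp [hkm]

-- B's deletion loop, characterised: erasing every key of m filters the items by non-membership in m
lemma pvFoldErase_spec (m : List String) :
    ∀ (d : PySem.Dict String String),
      m.foldl (fun d md => d.erase md) d =
        PySem.Dict.mk (d.items.filter (fun p => !(m.contains p.1))) := by
  induction m with
  | nil => intro d; simp
  | cons k rest ih =>
    intro d
    rw [List.foldl_cons, ih]
    have : (d.erase k).items = d.items.filter (fun p => !(p.1 == k)) := rfl
    rw [this, List.filter_filter]
    congr 1
    apply List.filter_congr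
    intro p _
    by_cases h : p.1 = k <;> simp [h]

-- ===== VERDICT =====
theorem search_duble_in_dict_spec : Claim_equal_search_duble_in_dict := by
  intro search_dt main_dict _
  unfold Spec_search_duble_in_dict search_duble_in_dict search_duble_in_dict_alt
  dsimp only
  set sdict := PySem.Dict.ofList search_dt with hs
  set mdict := PySem.Dict.ofList main_dict with hmd
  have hnd : sdict.keys.Nodup := by
    rw [hs]; exact PySem.Dict.nodup_keys_ofList _
  rw [pvFoldA_spec sdict mdict.keys sdict.keys PySem.Dict.empty 0 hnd
        (by intro k _; simp),
      pvFoldErase_spec mdict.keys sdict]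
  have hitems : sdict.items = sdict.keys.map (fun k => (k, sdict.getD k "")) :=
    PySem.Dict.items_eq_map_keys sdict hnd ""
  have hfil : sdict.items.filter (fun p => !(mdict.keys.contains p.1)) =
      (sdict.keys.filter (fun k => !(mdict.keys.contains k))).map (fun k => (k, sdict.getD k "")) := by
    rw [hitems, List.filter_map]
    rfl
  have hlen : sdict.keys.length = (sdict.keys.filter (fun k => mdict.keys.contains k)).length
      + (sdict.keys.filter (fun k => !(mdict.keys.contains k))).length :=
    List.length_eq_length_filter_add _
  have hsize : sdict.size = sdict.keys.length := by
    simp [PySem.Dict.size, PySem.Dict.keys]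
  refine Prod.ext_iff.mpr ⟨?_, ?_⟩
  · simpa using hfil.symm
  · show (0 : Int) + _ = _
    simp only [PySem.Dict.size] at *
    rw [hfil]
    simp only [List.length_map]
    omega
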